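-- pv_equiv track=rewrite | github.com/hosic2/Algorithm_CodingTest | 백준/Gold/2143. 두 배열의 합/두 배열의 합.py | part_arr
-- ===== SOURCE A (Python) =====
-- def part_arr(arr):
--     sub = []
--     for i in range(len(arr)):
--         total = 0
--         for j in range(i, len(arr)):
--             total += arr[j]
--             sub.append(total)
--     return sub
-- ===== SOURCE B (Python) =====
-- def part_arr(arr):
--     n = len(arr)
--     P = [0]
--     for x in arr:
--         P.append(P[-1] + x)
--     return [P[j + 1] - P[i] for i in range(n) for j in range(i, n)]
-- ===== Notes on version B (the rewrite author's own statement) =====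
-- stated objective: alternative
-- what changed: B precomputes a prefix-sum table once and emits every subarray sum as a difference of two table entries inside a comprehension, instead of A's per-start running accumulator with repeated appends.
import Mathlib
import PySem

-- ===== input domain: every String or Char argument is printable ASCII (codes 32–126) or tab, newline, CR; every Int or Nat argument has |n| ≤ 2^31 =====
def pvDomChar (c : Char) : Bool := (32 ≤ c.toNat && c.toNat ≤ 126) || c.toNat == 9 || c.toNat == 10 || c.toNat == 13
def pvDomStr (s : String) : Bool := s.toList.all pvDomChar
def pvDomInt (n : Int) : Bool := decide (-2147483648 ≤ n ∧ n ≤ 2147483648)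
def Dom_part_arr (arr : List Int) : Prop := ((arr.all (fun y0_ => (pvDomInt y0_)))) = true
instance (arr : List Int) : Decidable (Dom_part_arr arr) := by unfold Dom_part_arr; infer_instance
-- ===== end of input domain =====

-- B replaces A's per-start running accumulator with a precomputed prefix-sum table
-- read by subtraction inside a comprehension (alternative decomposition, same cost).


-- ===== PORT A =====
def part_arr (arr : List Int) : List Int :=
  (PySem.List.pyRange 0 arr.length 1).foldl (fun sub i =>
    ((PySem.List.pyRange i arr.length 1).foldl
      (fun (st : Int × List Int) j =>
        let total := st.1 + PySem.List.pyGetD arr j 0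
        (total, st.2 ++ [total]))
      ((0 : Int), sub)).2) []

-- ===== PORT B =====
def part_arr_alt (arr : List Int) : List Int :=
  let P : List Int := arr.foldl (fun p x => p ++ [PySem.List.pyGetD p (-1) 0 + x]) [(0 : Int)]
  (PySem.List.pyRange 0 arr.length 1).flatMap (fun i =>
    (PySem.List.pyRange i arr.length 1).map (fun j =>
      PySem.List.pyGetD P (j + 1) 0 - PySem.List.pyGetD P i 0))

-- ===== PRECONDITION & SPEC =====
def Spec_part_arr (arr : List Int) (out : List Int) : Prop := out = part_arr_alt arr
instance (arr : List Int) (out : List Int) : Decidable (Spec_part_arr arr out) := by unfold Spec_part_arr; infer_instance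

-- ===== CLAIM (what is proved, stated in full; the proofs are below) =====
def Claim_equal_part_arr : Prop := ∀ (arr : List Int), Dom_part_arr arr → Spec_part_arr arr (part_arr arr)

-- ===== LEMMAS AND PROOFS =====

-- prefix sum of arr up to (integer) index k
def pvS (arr : List Int) (k : Int) : Int := ((arr.take k.toNat).sum)

-- B's table-building loop produces exactly the prefix sums
theorem pvBuildP (arr : List Int) (p : List Int) (s : Int)
    (h : PySem.List.pyGetD p (-1) 0 = s) :
    arr.foldl (fun p x => p ++ [PySem.List.pyGetD p (-1) 0 + x]) p
      = p ++ (List.range arr.length).map (fun k => s + ((arr.take (k + 1)).sum)) := by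
  induction arr generalizing p s with
  | nil => simp
  | cons x xs ih =>
    simp only [List.foldl_cons, h]
    rw [ih (p ++ [s + x]) (s + x) (PySem.List.pyGetD_neg_one_append_singleton p (s + x) 0)]
    simp only [List.length_cons, List.range_succ_eq_map, List.map_cons, List.map_map,
      List.append_assoc, List.singleton_append, List.take_succ_cons, List.sum_cons]
    congr 2
    · simp
    · apply List.map_congr_left
      intro k _
      simp
      ring

theorem pvP_lookup (arr : List Int) (k : Int) (h0 : 0 ≤ k) (h1 : k ≤ arr.length) :
    PySem.List.pyGetD (arr.foldl (fun p x => p ++ [PySem.List.pyGetD p (-1) 0 + x]) [(0 : Int)]) k 0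
      = pvS arr k := by
  rw [pvBuildP arr [(0 : Int)] 0
    (by simpa using PySem.List.pyGetD_neg_one_append_singleton ([] : List Int) 0 0)]
  rcases Int.eq_ofNat_of_zero_le h0 with ⟨m, rfl⟩
  rw [PySem.List.pyGetD_natCast]
  cases m with
  | zero => simp [pvS]
  | succ m' =>
    have hm : m' < arr.length := by omega
    simp [List.getD, pvS, hm]

-- A's inner loop, characterised by prefix sums
theorem pvInner (arr : List Int) (n : Nat) (a : Int) (t : Int) (sub : List Int)
    (ha : 0 ≤ a) (hn : a + n ≤ arr.length) :
    (PySem.List.pyRange a (a + n) 1).foldl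
      (fun (st : Int × List Int) j =>
        let total := st.1 + PySem.List.pyGetD arr j 0
        (total, st.2 ++ [total]))
      (t, sub)
      = (t + pvS arr (a + n) - pvS arr a,
         sub ++ (PySem.List.pyRange a (a + n) 1).map
           (fun j => t + pvS arr (j + 1) - pvS arr a)) := by
  induction n generalizing a t sub with
  | zero =>
    rw [PySem.List.pyRange_one_eq_nil (by omega : a + ((0:Nat):Int) ≤ a)]
    simp
  | succ m ih =>
    have hlt : a < a + (m + 1 : Nat) := by omega
    rw [PySem.List.pyRange_one_cons hlt]
    simp only [List.foldl_cons, List.map_cons]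
    have hga : PySem.List.pyGetD arr a 0 = pvS arr (a + 1) - pvS arr a := by
      have hal : a.toNat < arr.length := by push_cast at hn; omega
      rw [PySem.List.pyGetD_eq_getElem arr 0 ha (by push_cast at hn ⊢; omega)]
      simp only [pvS]
      have h2 : (a + 1).toNat = a.toNat + 1 := by omega
      rw [h2, List.sum_take_succ arr a.toNat hal]
      ring
    have harr : a + 1 + (m : Int) = a + (m + 1 : Nat) := by push_cast; ring
    have := ih (a + 1) (t + PySem.List.pyGetD arr a 0) (sub ++ [t + PySem.List.pyGetD arr a 0])
      (by omega) (by push_cast at hn ⊢; omega)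
    rw [harr] at this
    rw [this, hga]
    simp only [Prod.mk.injEq]
    refine ⟨by ring, ?_⟩
    rw [List.append_assoc, List.singleton_append]
    congr 1
    congr 1
    · ring
    · apply List.map_congr_left
      intro j _
      ring

theorem part_arr_eq (arr : List Int) :
    part_arr arr = (PySem.List.pyRange 0 arr.length 1).flatMap
      (fun i => (PySem.List.pyRange i arr.length 1).map
        (fun j => pvS arr (j + 1) - pvS arr i)) := by
  unfold part_arr
  have step : ∀ (sub : List Int) (i : Int), i ∈ PySem.List.pyRange 0 (arr.length : Int) 1 →
      ((PySem.List.pyRange i (arr.length : Int) 1).foldl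
        (fun (st : Int × List Int) j =>
          let total := st.1 + PySem.List.pyGetD arr j 0
          (total, st.2 ++ [total])) ((0 : Int), sub)).2
      = sub ++ (PySem.List.pyRange i (arr.length : Int) 1).map
          (fun j => pvS arr (j + 1) - pvS arr i) := by
    intro sub i hi
    rw [PySem.List.mem_pyRange_one] at hi
    have hrepr : (arr.length : Int) = i + ((((arr.length : Int) - i).toNat : Nat) : Int) := by omega
    rw [hrepr, pvInner arr ((arr.length : Int) - i).toNat i 0 sub hi.1 (by omega)]
    simp
  rw [PySem.List.foldl_congr_mem _ _
    (fun sub i => sub ++ (PySem.List.pyRange i (arr.length : Int) 1).map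
      (fun j => pvS arr (j + 1) - pvS arr i)) _ step,
    PySem.List.foldl_append_eq_flatMap]
  simp

-- ===== VERDICT (by name: the statement is the Claim_ definition above) =====
theorem part_arr_spec : Claim_equal_part_arr := by
  intro arr _
  show part_arr arr = part_arr_alt arr
  rw [part_arr_eq]
  unfold part_arr_alt
  simp only []
  apply List.flatMap_congr
  intro i hi
  rw [PySem.List.mem_pyRange_one] at hi
  apply List.map_congr_left
  intro j hj
  rw [PySem.List.mem_pyRange_one] at hj
  rw [pvP_lookup arr (j + 1) (by omega) (by omega), pvP_lookup arr i (by omega) (by omega)]
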